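-- pv_equiv track=rewrite | github.com/ArinMnw/Copter01_AI_Bot_2 | strategy9.py | _pivot_high
-- ===== SOURCE A (Python) =====
-- def _pivot_high(values, idx: int, left: int, right: int) -> bool:
--     if idx - left < 0 or idx + right >= len(values):
--         return False
--     center = values[idx]
--     if center is None:
--         return False
--     window = values[idx - left:idx + right + 1]
--     if any(v is None for v in window):
--         return False
--     if center != max(window):
--         return False
--     return window.count(center) == 1
-- ===== SOURCE B (Python) =====
-- def _pivot_high(values, idx: int, left: int, right: int) -> bool:
--     if idx - left < 0 or idx + right >= len(values):
--         return False
--     best = None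
--     count = 0
--     for v in values[idx - left:idx + right + 1]:
--         if v is None:
--             return False
--         if best is None or v > best:
--             best, count = v, 1
--         elif v == best:
--             count += 1
--     return best is not None and values[idx] == best and count == 1
-- ===== Notes on version B (the rewrite author's own statement) =====
-- stated objective: alternative
-- what changed: Replaces A's staged library aggregates over a slice (any-None test, max, count of center) by a single accumulator fold that maintains the running maximum and its multiplicity, bailing out on the first None, with one final comparison of the center against the accumulator; the center plays no role during the scan.
-- outside the precondition, e.g. on _pivot_high([5, 1], 0, -1, 1): A returns False, B returns False; on _pivot_high([1, 2, 3], 1, -1, 0): A raises ValueError, B returns False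
import Mathlib
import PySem

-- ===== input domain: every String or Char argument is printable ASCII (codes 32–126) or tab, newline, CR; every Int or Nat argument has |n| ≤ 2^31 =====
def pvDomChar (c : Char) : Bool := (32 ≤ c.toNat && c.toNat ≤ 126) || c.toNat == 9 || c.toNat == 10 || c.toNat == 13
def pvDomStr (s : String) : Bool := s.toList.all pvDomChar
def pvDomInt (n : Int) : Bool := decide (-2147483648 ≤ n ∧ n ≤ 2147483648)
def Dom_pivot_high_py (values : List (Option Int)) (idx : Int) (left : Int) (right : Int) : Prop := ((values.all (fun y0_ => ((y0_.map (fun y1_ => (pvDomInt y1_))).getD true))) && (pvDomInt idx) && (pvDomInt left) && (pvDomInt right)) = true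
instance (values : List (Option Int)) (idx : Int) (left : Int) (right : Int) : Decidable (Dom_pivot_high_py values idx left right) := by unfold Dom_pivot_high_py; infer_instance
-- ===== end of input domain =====

-- B replaces A's staged aggregates over the slice (any-None, max, count of center) by a
-- single accumulator fold maintaining (running max, its multiplicity) with one final
-- comparison against the center; objective: alternative decomposition, same cost.


-- ===== PORT A =====
def pivot_high_py (values : List (Option Int)) (idx : Int) (left : Int) (right : Int) : Bool :=
  if idx - left < 0 ∨ (values.length : Int) ≤ idx + right then false
  else
    match PySem.List.pyGet? values idx with
    | none => false  -- values[idx] raises IndexError in Python; such inputs are outside Pre_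
    | some center =>
      if center = none then false
      else
        let window := PySem.List.slice values (some (idx - left)) (some (idx + right + 1))
        if window.any (fun v => v == none) then false
        else
          -- window holds no None here, so max with key (·.getD 0) is exactly Python's int max
          match PySem.List.max? window (fun v => v.getD 0) with
          | none => false  -- empty window: Python max raises ValueError; outside Pre_
          | some m =>
            if center ≠ m then false
            else PySem.List.count window center == 1

-- ===== PORT B =====
-- the for-loop of Source B: early return False on a None, else fold the (best, count) accumulator
def pivotAltLoop : List (Option Int) → Option Int → Int → Option (Option Int × Int)
  | [], best, cnt => some (best, cnt)
  | none :: _, _, _ => none                               -- 'if v is None: return False'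
  | some v :: rest, best, cnt =>
    match best with
    | none => pivotAltLoop rest (some v) 1
    | some b =>
      if b < v then pivotAltLoop rest (some v) 1
      else if v = b then pivotAltLoop rest (some b) (cnt + 1)
      else pivotAltLoop rest (some b) cnt

def pivot_high_py_alt (values : List (Option Int)) (idx : Int) (left : Int) (right : Int) : Bool :=
  if idx - left < 0 ∨ (values.length : Int) ≤ idx + right then false
  else
    match pivotAltLoop (PySem.List.slice values (some (idx - left)) (some (idx + right + 1))) none 0 with
    | none => false
    | some (none, _) => false                             -- 'best is not None' fails
    | some (some b, cnt) =>
      match PySem.List.pyGet? values idx with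
      | none => false  -- values[idx] would raise IndexError in Python; outside Pre_
      | some c => c == some b && cnt == 1

-- ===== PRECONDITION & SPEC =====
-- Pre_ excludes only negative window widths (left < 0 or right < 0) on inputs that pass the
-- bounds guard: outside the function's natural domain, where A may raise ValueError on an
-- empty window slice or IndexError on values[idx] (and A's value, when it does return, is an
-- aggregate over a window that does not contain the center).
def Pre_pivot_high_py (values : List (Option Int)) (idx : Int) (left : Int) (right : Int) : Prop :=
  (idx - left < 0 ∨ (values.length : Int) ≤ idx + right) ∨ (0 ≤ left ∧ 0 ≤ right)
instance (values : List (Option Int)) (idx : Int) (left : Int) (right : Int) : Decidable (Pre_pivot_high_py values idx left right) := by unfold Pre_pivot_high_py; infer_instance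

def pvWitness_pivot_high_py : List (Option Int) × Int × Int × Int := ([some 1, some 3, some 2], 1, 1, 1)

def Spec_pivot_high_py (values : List (Option Int)) (idx : Int) (left : Int) (right : Int) (out : Bool) : Prop := out = pivot_high_py_alt values idx left right
instance (values : List (Option Int)) (idx : Int) (left : Int) (right : Int) (out : Bool) : Decidable (Spec_pivot_high_py values idx left right out) := by unfold Spec_pivot_high_py; infer_instance

-- ===== CLAIM (what is proved, stated in full; the proofs are below) =====
def Claim_equal_pivot_high_py : Prop := ∀ (values : List (Option Int)) (idx : Int) (left : Int) (right : Int), Dom_pivot_high_py values idx left right → Pre_pivot_high_py values idx left right → Spec_pivot_high_py values idx left right (pivot_high_py values idx left right)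

-- ===== LEMMAS AND PROOFS =====

-- the fold result is the seed or an element
theorem pv_foldl_max_mem (es : List Int) (b : Int) : es.foldl max b = b ∨ es.foldl max b ∈ es := by
  induction es generalizing b with
  | nil => left; rfl
  | cons v t ih =>
    have hstep : List.foldl max b (v :: t) = t.foldl max (max b v) := rfl
    rw [hstep]
    rcases ih (max b v) with h | h
    · by_cases hvb : v ≤ b
      · left; rw [h]; exact max_eq_left hvb
      · right; rw [h, max_eq_right (by omega : b ≤ v)]; exact List.mem_cons_self ..
    · right; exact List.mem_cons_of_mem _ h

-- a window containing a None makes B's loop bail out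
theorem pv_loop_none (w : List (Option Int)) (best : Option Int) (cnt : Int)
    (h : none ∈ w) : pivotAltLoop w best cnt = none := by
  induction w generalizing best cnt with
  | nil => simp at h
  | cons x t ih =>
    cases x with
    | none => rfl
    | some v =>
      have ht : none ∈ t := by
        rcases List.mem_cons.mp h with h0 | h0
        · exact absurd h0.symm (by simp)
        · exact h0
      cases best with
      | none => exact ih _ _ ht
      | some b =>
        simp only [pivotAltLoop]
        split_ifs <;> exact ih _ _ ht

-- loop invariant: starting from (some b, cnt) on a None-free list, the loop returns the
-- running maximum and its multiplicity (plus the seed's contribution when the seed survives)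
theorem pv_loop_inv (w : List (Option Int)) (b cnt : Int) (h : ∀ x ∈ w, x ≠ none) :
    pivotAltLoop w (some b) cnt =
      some (some ((w.filterMap id).foldl max b),
            (((w.filterMap id).count ((w.filterMap id).foldl max b) : Int)
              + (if (w.filterMap id).foldl max b = b then cnt else 0))) := by
  induction w generalizing b cnt with
  | nil => simp [pivotAltLoop]
  | cons x t ih =>
    cases x with
    | none => exact absurd rfl (h none (List.mem_cons_self ..))
    | some v =>
      have ht : ∀ x ∈ t, x ≠ none := fun x hx => h x (List.mem_cons_of_mem _ hx)
      have hfm : List.filterMap id (some v :: t) = v :: t.filterMap id := by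
        simp [List.filterMap_cons]
      simp only [pivotAltLoop]
      rw [hfm]
      by_cases hbv : b < v
      · rw [if_pos hbv, ih v 1 ht]
        have hmax : List.foldl max b (v :: t.filterMap id) =
            List.foldl max v (t.filterMap id) := by
          rw [List.foldl_cons, max_eq_right hbv.le]
        rw [hmax]
        have hble : v ≤ List.foldl max v (t.filterMap id) :=
          (PySem.List.le_foldl_max (t.filterMap id) v).1
        simp only [Option.some.injEq, Prod.mk.injEq]
        refine ⟨trivial, ?_⟩
        rw [List.count_cons]
        simp only [beq_iff_eq]
        split_ifs <;> push_cast <;> omega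
      · rw [if_neg hbv]
        have hmax : List.foldl max b (v :: t.filterMap id) =
            List.foldl max b (t.filterMap id) := by
          rw [List.foldl_cons, max_eq_left (by omega : v ≤ b)]
        have hble : b ≤ List.foldl max b (t.filterMap id) :=
          (PySem.List.le_foldl_max (t.filterMap id) b).1
        by_cases hvb : v = b
        · rw [if_pos hvb, ih b (cnt + 1) ht, hmax]
          simp only [Option.some.injEq, Prod.mk.injEq]
          refine ⟨trivial, ?_⟩
          rw [List.count_cons]
          simp only [beq_iff_eq]
          subst hvb
          split_ifs <;> push_cast <;> omega
        · rw [if_neg hvb, ih b cnt ht, hmax]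
          simp only [Option.some.injEq, Prod.mk.injEq]
          refine ⟨trivial, ?_⟩
          rw [List.count_cons]
          simp only [beq_iff_eq]
          have hvb2 : v < b := by omega
          split_ifs <;> push_cast <;> omega

-- on a None-free list, counting (some c) equals counting c among the unwrapped ints
theorem pv_count_filterMap (w : List (Option Int)) (c : Int) (h : ∀ x ∈ w, x ≠ none) :
    List.count (some c) w = (w.filterMap id).count c := by
  induction w with
  | nil => simp
  | cons x t ih =>
    cases x with
    | none => exact absurd rfl (h none (List.mem_cons_self ..))
    | some v =>
      have ht : ∀ x ∈ t, x ≠ none := fun x hx => h x (List.mem_cons_of_mem _ hx)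
      simp [List.count_cons, ih ht]

-- ===== VERDICT (by name: the statement is the Claim_ definition above) =====
theorem pivot_high_py_spec : Claim_equal_pivot_high_py := by
  intro values idx l r _ hpre
  unfold Spec_pivot_high_py
  by_cases hg : idx - l < 0 ∨ (values.length : Int) ≤ idx + r
  · unfold pivot_high_py pivot_high_py_alt
    rw [if_pos hg, if_pos hg]
  · obtain ⟨hl0, hr0⟩ : 0 ≤ l ∧ 0 ≤ r := hpre.resolve_left hg
    rw [not_or] at hg
    obtain ⟨hg1, hg2⟩ := hg
    have hidx0 : 0 ≤ idx := by omega
    have hN : idx.toNat < values.length := by omega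
    unfold pivot_high_py pivot_high_py_alt
    rw [if_neg (by omega : ¬ (idx - l < 0 ∨ (values.length : Int) ≤ idx + r)),
        if_neg (by omega : ¬ (idx - l < 0 ∨ (values.length : Int) ≤ idx + r)),
        PySem.List.pyGet?_of_nonneg values hidx0]
    have haI : idx - l = ((idx - l).toNat : Int) := by omega
    have hbI : idx + r + 1 = (((idx + r + 1).toNat) : Int) := by omega
    set aN := (idx - l).toNat with haN
    set bN := (idx + r + 1).toNat with hbN
    have hab1 : aN ≤ idx.toNat := by omega
    have hab2 : idx.toNat < bN := by omega
    have hab3 : bN ≤ values.length := by omega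
    rw [haI, hbI, PySem.List.slice_natCast]
    set w := (values.drop aN).take (bN - aN) with hw
    have hwlen : w.length = bN - aN := by simp [hw]; omega
    have hwget : ∀ k, k < bN - aN → w[k]? = values[aN + k]? := by
      intro k hk
      rw [hw, List.getElem?_take_of_lt hk, List.getElem?_drop]
    have hLlt : idx.toNat - aN < bN - aN := by omega
    have hwL : w[idx.toNat - aN]? = values[idx.toNat]? := by
      rw [hwget _ hLlt, show aN + (idx.toNat - aN) = idx.toNat by omega]
    cases hc : values[idx.toNat]? with
    | none => exact absurd hc (by simp [List.getElem?_eq_getElem hN])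
    | some center =>
      cases center with
      | none =>
        -- center is None: A fails its center check; B's loop hits the None in the window
        have hB := pv_loop_none w none 0 (List.mem_of_getElem? (by rw [hwL, hc]))
        simp [hB]
      | some c =>
        dsimp only
        rw [if_neg (by simp : ¬ ((some c : Option Int) = none))]
        by_cases hnn : ∀ x ∈ w, x ≠ none
        · -- no None in the window
          have hany : w.any (fun v => v == none) = false := by
            rw [List.any_eq_false]; intro x hx; simpa using hnn x hx
          rw [if_neg (by rw [hany]; simp)]
          -- destructure the nonempty window
          have hwne : w ≠ [] := by
            intro h0; rw [h0] at hwlen; simp at hwlen; omega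
          obtain ⟨x, t, hxt⟩ := List.exists_cons_of_ne_nil hwne
          obtain ⟨e0, hx0⟩ : ∃ e0, x = some e0 := by
            cases x with
            | none => exact absurd rfl (by rw [hxt] at hnn; exact hnn none (List.mem_cons_self ..))
            | some e0 => exact ⟨e0, rfl⟩
          subst hx0
          have ht : ∀ y ∈ t, y ≠ none := by
            intro y hy; exact hnn y (by rw [hxt]; exact List.mem_cons_of_mem _ hy)
          set est := t.filterMap id with hest
          set M := est.foldl max e0 with hMdef
          -- B's loop on the window
          have hloopStart : pivotAltLoop w none 0 = pivotAltLoop t (some e0) 1 := by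
            rw [hxt]; rfl
          have hloop : pivotAltLoop w none 0 =
              some (some M, ((est.count M : Int) + if M = e0 then 1 else 0)) := by
            rw [hloopStart, pv_loop_inv t e0 1 ht]
          -- A's max? on the window returns exactly the running maximum M
          obtain ⟨m, hm⟩ : ∃ m, PySem.List.max? w (fun v => v.getD 0) = some m := by
            cases hmx : PySem.List.max? w (fun v => v.getD 0) with
            | none => exact absurd ((PySem.List.max?_eq_none_iff _ _).mp hmx) hwne
            | some m => exact ⟨m, rfl⟩
          have hmw : m ∈ w := PySem.List.max?_mem hm
          obtain ⟨v0, hv0⟩ : ∃ v0, m = some v0 := by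
            cases m with
            | none => exact absurd rfl (hnn none hmw)
            | some v0 => exact ⟨v0, rfl⟩
          subst hv0
          have hv0mem : v0 = e0 ∨ v0 ∈ est := by
            rw [hxt] at hmw
            rcases List.mem_cons.mp hmw with h0 | h0
            · left; simpa using h0
            · right; rw [hest, List.mem_filterMap]; exact ⟨some v0, h0, rfl⟩
          have hv0le : v0 ≤ M := by
            rcases hv0mem with h0 | h0
            · rw [h0]; exact (PySem.List.le_foldl_max est e0).1
            · exact (PySem.List.le_foldl_max est e0).2 v0 h0
          have hMw : some M ∈ w := by
            rcases pv_foldl_max_mem est e0 with h0 | h0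
            · have hMe : M = e0 := h0
              rw [hxt, hMe]; exact List.mem_cons_self ..
            · obtain ⟨y, hy, hyM⟩ := List.mem_filterMap.mp h0
              have hys : y = some M := by
                cases y with
                | none => exact absurd hyM (by simp)
                | some z => exact congrArg some (by simpa using hyM)
              rw [hxt]; exact List.mem_cons_of_mem _ (hys ▸ hy)
          have hMle : M ≤ v0 := by
            have := PySem.List.max?_isMax hm (some M) hMw
            simpa using this
          have hv0M : v0 = M := le_antisymm hv0le hMle
          subst hv0M
          rw [hm, hloop]
          dsimp only
          by_cases hcM : c = M
          · rw [← hcM]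
            rw [if_neg (by simp)]
            have hcountw : PySem.List.count w (some c) =
                est.count c + (if e0 = c then 1 else 0) := by
              rw [PySem.List.count_eq, pv_count_filterMap w c hnn, hxt]
              simp only [List.filterMap_cons, id_eq, ← hest]
              rw [List.count_cons]
              simp only [beq_iff_eq]
              rfl
            rw [Bool.eq_iff_iff]
            constructor
            · intro h0
              simp only [beq_iff_eq] at h0
              rw [hcountw] at h0
              simp only [Bool.and_eq_true, beq_iff_eq]
              refine ⟨by simp, ?_⟩
              by_cases he : e0 = c
              · rw [if_pos he] at h0
                rw [if_pos he.symm]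
                push_cast
                omega
              · rw [if_neg he] at h0
                rw [if_neg (fun h => he h.symm)]
                push_cast
                omega
            · intro h0
              obtain ⟨-, h0⟩ := (Bool.and_eq_true _ _).mp h0
              simp only [beq_iff_eq] at h0 ⊢
              rw [hcountw]
              by_cases he : e0 = c
              · rw [if_pos he.symm] at h0
                rw [if_pos he]
                push_cast at h0
                omega
              · rw [if_neg (fun h => he h.symm)] at h0
                rw [if_neg he]
                push_cast at h0
                omega
          · rw [if_pos (by simpa using hcM)]
            have hf : (some c == some M) = false := by simpa using hcM
            rw [Bool.eq_iff_iff]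
            simp [hf]
        · -- the window contains a None: A's any-test fires, B's loop bails out
          push_neg at hnn
          obtain ⟨x, hxw, hxn⟩ := hnn
          have hxnone : x = none := by simpa using hxn
          subst hxnone
          have hany : w.any (fun v => v == none) = true := by
            rw [List.any_eq_true]; exact ⟨none, hxw, by simp⟩
          rw [if_pos hany, pv_loop_none w none 0 hxw]
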